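-- pv_equiv track=rewrite | github.com/osj3474/Algorithm-Practice | Practice/_11street/street2.py | solution
-- ===== SOURCE A (Python) =====
-- from collections import defaultdict
--
-- def solution(S):
--     M = len(S[0])
--     N = len(S)
--     row1, row2, col = 0, 0, 0
--     for c in range(M):
--         alpha_dic = defaultdict(int)
--         for r in range(N):
--             alpha_dic[S[r][c]] += 1
--             if alpha_dic[S[r][c]] == 2:
--                 row2, col = r, c
--                 break
--
--     for i in range(row2):
--         if S[i][col] == S[row2][col]:
--             row1 = i
--             break
--     answer = [row1, row2, col]
--     if answer == [0,0,0]: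
--         answer = []
--     return answer
-- ===== SOURCE B (Python) =====
-- def solution(S):
--     N = len(S)
--     for c in reversed(range(len(S[0]))):
--         hit = next(((r2, r1) for r2 in range(N) for r1 in range(r2) if S[r1][c] == S[r2][c]), None)
--         if hit is not None:
--             row2, row1 = hit
--             return [row1, row2, c]
--     return []
-- ===== Notes on version B (the rewrite author's own statement) =====
-- stated objective: simpler
-- what changed: B replaces A's incremental counter-dict scan plus separate re-scan pass by taking the lexicographically first ordered row pair (r2, r1) from a per-column pair generator (earliest repeat together with its first occurrence in one shot) and walks the columns right-to-left returning at the first duplicated column, instead of A's left-to-right overwrite; no dict and no second pass.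
-- outside the precondition, e.g. on solution([]): A raises IndexError, B raises IndexError
import Mathlib
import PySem

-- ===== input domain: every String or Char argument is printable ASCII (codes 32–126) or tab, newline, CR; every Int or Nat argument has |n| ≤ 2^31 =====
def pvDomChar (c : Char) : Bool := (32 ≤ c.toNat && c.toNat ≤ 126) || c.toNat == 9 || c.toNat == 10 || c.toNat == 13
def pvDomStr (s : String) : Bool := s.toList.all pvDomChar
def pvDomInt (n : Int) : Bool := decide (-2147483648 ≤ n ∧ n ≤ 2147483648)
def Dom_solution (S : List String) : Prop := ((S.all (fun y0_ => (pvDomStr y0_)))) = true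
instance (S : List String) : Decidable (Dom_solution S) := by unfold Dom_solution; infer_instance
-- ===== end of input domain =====

-- B enumerates all ordered row pairs of each column (lexicographically first pair = earliest
-- repeat with its first occurrence) and scans columns right-to-left with an early return,
-- dropping A's counter dict and its second re-scan pass (objective: simpler, not faster).

-- shared atomic helper: the character S[r][c] (Python indexing; the getD defaults are only
-- reached outside Pre_solution, where Python raises IndexError)
def pvCharAt (S : List String) (r c : Nat) : Char :=
  (PySem.Str.pyGet? ((PySem.List.pyGet? S (r : Int)).getD "") (c : Int)).getD ' '

-- ===== PORT A =====
-- inner loop: defaultdict(int) counter over rows, break when a count reaches 2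
def solAInner (S : List String) (c : Nat) : List Nat → PySem.Dict Char Int → Option Nat
  | [], _ => none
  | r :: rs, d =>
    let ch := pvCharAt S r c
    let d' := d.modify ch 0 (· + 1)
    if d'.getD ch 0 = 2 then some r else solAInner S c rs d'

-- outer loop over columns, carrying (row2, col)
def solAOuter (S : List String) (N : Nat) : List Nat → Nat × Nat → Nat × Nat
  | [], st => st
  | c :: cs, st =>
    match solAInner S c (List.range N) PySem.Dict.empty with
    | some r => solAOuter S N cs (r, c)
    | none => solAOuter S N cs st

-- second pass: first i < row2 with S[i][col] == S[row2][col]; row1 stays 0 if none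
def solAScan (S : List String) (col row2 : Nat) : List Nat → Nat
  | [] => 0
  | i :: is => if pvCharAt S i col == pvCharAt S row2 col then i else solAScan S col row2 is

def solution (S : List String) : List Int :=
  -- len(S[0]) ported as toList.length (exact: number of characters)
  let M := (((PySem.List.pyGet? S 0).getD "").toList).length
  let N := S.length
  let st := solAOuter S N (List.range M) (0, 0)
  let row2 := st.1
  let col := st.2
  let row1 := solAScan S col row2 (List.range row2)
  let answer : List Int := [(row1 : Int), (row2 : Int), (col : Int)]
  if answer = [0, 0, 0] then [] else answer

-- ===== PORT B =====
-- the pair generator ((r2, r1) for r2 in range(N) for r1 in range(r2) if S[r1][c] == S[r2][c]);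
-- Source B only takes its first element (next(..., None)), which is head? of this list
def solBPairs (S : List String) (c N : Nat) : List (Nat × Nat) :=
  (List.range N).flatMap (fun r2 =>
    ((List.range r2).filter (fun r1 => pvCharAt S r1 c == pvCharAt S r2 c)).map (fun r1 => (r2, r1)))

-- for c in reversed(range(M)): hit = next(gen, None); if hit is not None: return [row1, row2, c]
def solBLoop (S : List String) (N : Nat) : List Nat → List Int
  | [] => []
  | c :: cs =>
    match (solBPairs S c N).head? with
    | some (r2, r1) => [(r1 : Int), (r2 : Int), (c : Int)]
    | none => solBLoop S N cs

def solution_alt (S : List String) : List Int :=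
  let M := (((PySem.List.pyGet? S 0).getD "").toList).length
  solBLoop S S.length ((List.range M).reverse)

-- ===== PRECONDITION & SPEC =====
-- Pre_ excludes exactly the inputs where A raises IndexError: S = [] (S[0]), and inputs where in
-- some column c < len(S[0]) a row shorter than c+1 is reached before that column's first repeated
-- value (both loops break at the first repeat, so later short rows are never read).
def Pre_solution (S : List String) : Prop :=
  S ≠ [] ∧ ∀ c < ((S.headD "").toList).length,
    (∀ s ∈ S, c < (s.toList).length) ∨
    ∃ k < S.findIdx (fun s => (s.toList).length ≤ c), ∃ j < k,
      ((S.getD j "").toList).getD c ' ' = ((S.getD k "").toList).getD c ' '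
instance (S : List String) : Decidable (Pre_solution S) := by unfold Pre_solution; infer_instance
def pvWitness_solution : List String := ["ab", "cb"]

def Spec_solution (S : List String) (out : List Int) : Prop := out = solution_alt S
instance (S : List String) (out : List Int) : Decidable (Spec_solution S out) := by unfold Spec_solution; infer_instance

-- ===== CLAIM (what is proved, stated in full; the proofs are below) =====
def Claim_equal_solution : Prop := ∀ (S : List String), Dom_solution S → Pre_solution S → Spec_solution S (solution S)

-- ===== LEMMAS AND PROOFS =====

-- "row r has an equal character strictly above it in column c"
def hasPrev (S : List String) (c r : Nat) : Bool :=
  decide (∃ i < r, pvCharAt S i c = pvCharAt S r c)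

-- the first repeated row of column c — what A's inner loop and B's first pair both compute
def fDup (S : List String) (c N : Nat) : Option Nat := (List.range N).find? (hasPrev S c)

-- A's counter dict holds 1 exactly for the characters already seen (rows seen so far are
-- duplicate-free, or the loop would have broken), so the break row is the first repeat
lemma innerA_spec (S : List String) (c : Nat) :
    ∀ (n a : Nat) (d : PySem.Dict Char Int),
      (∀ ch, d.getD ch 0 = if (∃ i < a, pvCharAt S i c = ch) then 1 else 0) →
      solAInner S c (List.range' a n) d = (List.range' a n).find? (hasPrev S c) := by
  intro n
  induction n with
  | zero => intro a d _; rfl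
  | succ n ih =>
    intro a d hd
    rw [List.range'_succ]
    simp only [solAInner, List.find?]
    by_cases h : ∃ i < a, pvCharAt S i c = pvCharAt S a c
    · have h1 : d.getD (pvCharAt S a c) 0 = 1 := by rw [hd]; simp [h]
      rw [PySem.Dict.getD_modify_self, h1]
      have hp : hasPrev S c a = true := by simp [hasPrev]; exact h
      simp [hp]
    · have h0 : d.getD (pvCharAt S a c) 0 = 0 := by rw [hd]; simp [h]
      rw [PySem.Dict.getD_modify_self, h0]
      have hp : hasPrev S c a = false := by simp [hasPrev]; intro i hi; exact fun he => h ⟨i, hi, he⟩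
      rw [if_neg (by norm_num : ¬((0:Int) + 1 = 2)), hp]
      apply ih
      intro ch
      rw [PySem.Dict.getD_modify]
      by_cases he : ch = pvCharAt S a c
      · subst he
        rw [if_pos rfl, h0]
        have hx : ∃ i < a + 1, pvCharAt S i c = pvCharAt S a c := ⟨a, Nat.lt_succ_self a, rfl⟩
        rw [if_pos hx]; norm_num
      · rw [if_neg he, hd]
        congr 1
        · simp only [eq_iff_iff]
          constructor
          · rintro ⟨i, hi, hc⟩; exact ⟨i, Nat.lt_succ_of_lt hi, hc⟩
          · rintro ⟨i, hi, hc⟩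
            rcases Nat.lt_succ_iff_lt_or_eq.mp hi with hi' | hi'
            · exact ⟨i, hi', hc⟩
            · subst hi'; exact absurd hc (fun hh => he hh.symm)

-- A's second pass is the first match (defaulting to 0)
lemma scanA_spec (S : List String) (c r2 : Nat) :
    ∀ l : List Nat,
      solAScan S c r2 l = (l.find? (fun i => pvCharAt S i c == pvCharAt S r2 c)).getD 0 := by
  intro l
  induction l with
  | nil => rfl
  | cons i is ih =>
    simp only [solAScan, List.find?]
    by_cases h : pvCharAt S i c == pvCharAt S r2 c
    · simp [h]
    · simp only [Bool.not_eq_true] at h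
      simp [h, ih]

lemma fDup_of_innerA (S : List String) (c N : Nat) :
    solAInner S c (List.range N) PySem.Dict.empty = fDup S c N := by
  rw [List.range_eq_range', fDup, List.range_eq_range']
  apply innerA_spec
  intro ch
  rw [PySem.Dict.getD_empty]
  have : ¬ ∃ i < 0, pvCharAt S i c = ch := by rintro ⟨i, hi, _⟩; omega
  rw [if_neg this]

-- A's outer loop keeps the LAST column with a repeat = first hit searching the reversed columns
lemma outerA_spec (S : List String) (N : Nat) :
    ∀ (cs : List Nat) (st : Nat × Nat),
      solAOuter S N cs st =
        match cs.reverse.find? (fun c => (fDup S c N).isSome) with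
        | some c => ((fDup S c N).getD 0, c)
        | none => st := by
  intro cs
  induction cs with
  | nil => intro st; rfl
  | cons c cs ih =>
    intro st
    simp only [solAOuter, fDup_of_innerA, List.reverse_cons, List.find?_append]
    cases hf : cs.reverse.find? (fun c => (fDup S c N).isSome) with
    | some c' =>
      cases hd : fDup S c N with
      | some r => dsimp only; rw [ih (r, c)]; simp [hf]
      | none => dsimp only; rw [ih st]; simp [hf]
    | none =>
      cases hd : fDup S c N with
      | some r => dsimp only; rw [ih (r, c)]; simp [hf, hd]
      | none => dsimp only; rw [ih st]; simp [hf, hd]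

-- head of B's pair comprehension: the first r2 with a prior equal char, with the first such r1
lemma head_flat (S : List String) (c : Nat) :
    ∀ (n a : Nat),
      ((List.range' a n).flatMap (fun r2 =>
        ((List.range r2).filter (fun r1 => pvCharAt S r1 c == pvCharAt S r2 c)).map (fun r1 => (r2, r1)))).head? =
      match (List.range' a n).find? (hasPrev S c) with
      | some r2 => some (r2, ((List.range r2).find? (fun i => pvCharAt S i c == pvCharAt S r2 c)).getD 0)
      | none => none := by
  intro n
  induction n with
  | zero => intro a; rfl
  | succ n ih =>
    intro a
    rw [List.range'_succ]
    simp only [List.flatMap_cons, List.head?_append, List.find?]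
    by_cases h : ∃ i < a, pvCharAt S i c = pvCharAt S a c
    · have hp : hasPrev S c a = true := by simp [hasPrev]; exact h
      obtain ⟨i0, hi0, he0⟩ := h
      have hne : (List.range a).find? (fun i => pvCharAt S i c == pvCharAt S a c) ≠ none := by
        rw [ne_eq, List.find?_eq_none]
        push Not
        exact ⟨i0, List.mem_range.mpr hi0, by simp [he0]⟩
      cases hr1 : (List.range a).find? (fun i => pvCharAt S i c == pvCharAt S a c) with
      | none => exact absurd hr1 hne
      | some r1 =>
        have hh : ((List.range a).filter (fun r1 => pvCharAt S r1 c == pvCharAt S a c)).head? = some r1 := by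
          rw [List.head?_filter]
          exact hr1
        simp [hh, hp, hr1]
    · have hp : hasPrev S c a = false := by simp [hasPrev]; intro i hi; exact fun he => h ⟨i, hi, he⟩
      have hemp : (List.range a).filter (fun r1 => pvCharAt S r1 c == pvCharAt S a c) = [] := by
        rw [List.filter_eq_nil_iff]
        intro i hi
        simp only [beq_iff_eq]
        exact fun he => h ⟨i, List.mem_range.mp hi, he⟩
      simp [hemp, hp, ih]

lemma pairsHead_spec (S : List String) (c N : Nat) :
    (solBPairs S c N).head? =
      match fDup S c N with
      | some r2 => some (r2, ((List.range r2).find? (fun i => pvCharAt S i c == pvCharAt S r2 c)).getD 0)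
      | none => none := by
  rw [solBPairs, fDup, List.range_eq_range']
  exact head_flat S c N 0

-- B's column loop returns at the first column (in the given order) whose pair list is nonempty
lemma loopB_spec (S : List String) (N : Nat) :
    ∀ cs : List Nat,
      solBLoop S N cs =
        match cs.find? (fun c => (fDup S c N).isSome) with
        | some c =>
          match fDup S c N with
          | some r2 => [((((List.range r2).find? (fun i => pvCharAt S i c == pvCharAt S r2 c)).getD 0 : Nat) : Int), (r2 : Int), (c : Int)]
          | none => []
        | none => [] := by
  intro cs
  induction cs with
  | nil => rfl
  | cons c cs ih =>
    simp only [solBLoop, pairsHead_spec, List.find?]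
    cases hd : fDup S c N with
    | some r2 => simp [hd]
    | none => simp [ih]

-- a repeated row is never row 0 (it needs a row above it), so A's [0,0,0] sentinel never fires
lemma dup_pos (S : List String) (c N r2 : Nat) (h : fDup S c N = some r2) : 0 < r2 := by
  have := List.find?_some h
  simp only [hasPrev, decide_eq_true_eq] at this
  obtain ⟨i, hi, _⟩ := this
  omega

lemma solution_eq (S : List String) : solution S = solution_alt S := by
  simp only [solution, solution_alt]
  rw [outerA_spec, loopB_spec]
  cases hf : (List.range (((PySem.List.pyGet? S 0).getD "").toList).length).reverse.find?
      (fun c => (fDup S c S.length).isSome) with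
  | none => simp [solAScan]
  | some c =>
    cases hd : fDup S c S.length with
    | some r2 =>
      have hpos := dup_pos S c S.length r2 hd
      simp [hd, scanA_spec]
      intro _ h _
      omega
    | none =>
      have := List.find?_some hf
      simp [hd] at this

-- ===== VERDICT (by name: the statement is the Claim_ definition above) =====
theorem solution_spec : Claim_equal_solution := by
  intro S _hDom _hPre
  unfold Spec_solution
  exact solution_eq S
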